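-- pv_equiv track=rewrite | github.com/DHI-GRAS/sat-api-client | sat_api_client/filter_tools.py | group_results_by_date
-- ===== SOURCE A (Python) =====
-- from collections import defaultdict
-- from collections import OrderedDict
--
-- def group_results_by_date(results):
--     """Group results from SAT-API query by date
--
--     Parameters
--     ----------
--     list of dict
--         results
--
--     Returns
--     -------
--     OrderedDict date string -> list of dict
--         grouped results
--         keys: YYYY-MM-DD
--         sorted by date
--     """
--     results_grouped = defaultdict(list)
--     for r in results:
--         date = r['date']
--         results_grouped[date].append(r)
--     groups_sorted = OrderedDict()
--     for k in sorted(list(results_grouped)):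
--         groups_sorted[k] = results_grouped[k]
--     return groups_sorted
-- ===== SOURCE B (Python) =====
-- from collections import OrderedDict
--
--
-- def group_results_by_date(results):
--     """Sort all records by date (stable), then emit each consecutive
--     same-date run as one group of the OrderedDict."""
--     by_date = sorted(results, key=lambda r: r['date'])
--     grouped = OrderedDict()
--     i = 0
--     while i < len(by_date):
--         d = by_date[i]['date']
--         j = i + 1
--         while j < len(by_date) and by_date[j]['date'] == d:
--             j += 1
--         grouped[d] = by_date[i:j]
--         i = j
--     return grouped
-- ===== Notes on version B (the rewrite author's own statement) =====
-- stated objective: alternative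
-- what changed: A groups records into a defaultdict in one pass and then sorts the distinct date keys; B stably sorts the whole record list by date first and then builds the OrderedDict in a single consecutive-run scan over the sorted list.
import Mathlib
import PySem

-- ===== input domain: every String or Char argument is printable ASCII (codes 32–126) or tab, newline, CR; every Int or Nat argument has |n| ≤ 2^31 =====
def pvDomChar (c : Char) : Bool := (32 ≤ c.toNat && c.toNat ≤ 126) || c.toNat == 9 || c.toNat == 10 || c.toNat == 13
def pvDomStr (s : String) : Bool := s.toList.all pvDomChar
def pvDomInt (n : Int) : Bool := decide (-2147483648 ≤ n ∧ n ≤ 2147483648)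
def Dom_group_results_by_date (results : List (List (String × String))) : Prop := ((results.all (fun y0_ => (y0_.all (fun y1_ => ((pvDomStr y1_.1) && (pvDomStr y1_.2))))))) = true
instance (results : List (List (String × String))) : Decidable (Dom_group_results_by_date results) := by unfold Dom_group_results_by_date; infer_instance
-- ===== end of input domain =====

-- B sorts all records by date first and emits consecutive same-date runs, instead of A's
-- defaultdict grouping followed by a sort of the distinct keys (objective: alternative).


-- r['date'] on the record dict r (first-match lookup); total form via getD "",
-- used by both ports; Pre_ guarantees the key is present (Python would raise KeyError otherwise).
def pvDateOf (r : List (String × String)) : String := (List.lookup "date" r).getD ""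

-- ===== PORT A =====
def group_results_by_date (results : List (List (String × String))) : List (String × List (List (String × String))) :=
  let grouped : PySem.Dict String (List (List (String × String))) :=
    results.foldl (fun d r => d.modify (pvDateOf r) [] (fun g => g ++ [r])) PySem.Dict.empty
  (PySem.List.sorted grouped.keys (fun k => k)).foldl
    (fun acc k => acc ++ [(k, grouped.getD k [])]) []

-- ===== PORT B =====
-- the outer while-loop of Source B: emit the run starting at the head, continue after it
def pvRuns (xs : List (List (String × String))) : List (String × List (List (String × String))) :=
  match xs with
  | [] => []
  | r :: rest =>
    (pvDateOf r, r :: rest.takeWhile (fun x => pvDateOf x == pvDateOf r)) ::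
      pvRuns (rest.dropWhile (fun x => pvDateOf x == pvDateOf r))
termination_by xs.length
decreasing_by
  simp only [List.length_cons]
  exact Nat.lt_succ_of_le (List.length_dropWhile_le _ _)

def group_results_by_date_alt (results : List (List (String × String))) : List (String × List (List (String × String))) :=
  pvRuns (PySem.List.sorted results pvDateOf)

-- ===== PRECONDITION & SPEC =====
-- Pre_ excludes exactly the inputs where some record has no 'date' key: there Python A
-- (and Python B) raises KeyError.
def Pre_group_results_by_date (results : List (List (String × String))) : Prop :=
  ∀ r ∈ results, "date" ∈ r.map Prod.fst
instance (results : List (List (String × String))) : Decidable (Pre_group_results_by_date results) := by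
  unfold Pre_group_results_by_date; infer_instance

def pvWitness_group_results_by_date : (List (List (String × String))) :=
  [[("date", "2020-01-02"), ("id", "a")], [("date", "2020-01-01")], [("date", "2020-01-02"), ("id", "b")]]

def Spec_group_results_by_date (results : List (List (String × String))) (out : List (String × List (List (String × String)))) : Prop := out = group_results_by_date_alt results
instance (results : List (List (String × String))) (out : List (String × List (List (String × String)))) : Decidable (Spec_group_results_by_date results out) := by unfold Spec_group_results_by_date; infer_instance

-- ===== CLAIM (what is proved, stated in full; the proofs are below) =====
def Claim_equal_group_results_by_date : Prop := ∀ (results : List (List (String × String))), Dom_group_results_by_date results → Pre_group_results_by_date results → Spec_group_results_by_date results (group_results_by_date results)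

-- ===== LEMMAS AND PROOFS =====


theorem pv_foldl_append_singleton {α β : Type} (f : α → β) (xs : List α) (acc : List β) :
    xs.foldl (fun a k => a ++ [f k]) acc = acc ++ xs.map f := by
  induction xs generalizing acc with
  | nil => simp
  | cons x xs ih => simp [List.foldl_cons, ih]

theorem pv_filter_insertBy (d : String) (x : List (String × String))
    (l : List (List (String × String)))
    (hl : l.Pairwise (fun a b => pvDateOf a ≤ pvDateOf b)) :
    (PySem.List.insertBy (fun a b => decide (pvDateOf a < pvDateOf b)) x l).filter
        (fun y => pvDateOf y == d) =
      if pvDateOf x == d then l.filter (fun y => pvDateOf y == d) ++ [x]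
      else l.filter (fun y => pvDateOf y == d) := by
  induction l with
  | nil =>
    simp only [PySem.List.insertBy, List.filter_nil, List.filter_cons]
    split_ifs with h <;> simp
  | cons y ys ih =>
    rcases List.pairwise_cons.mp hl with ⟨hy, hys⟩
    by_cases hlt : pvDateOf x < pvDateOf y
    · have hxy : PySem.List.insertBy (fun a b => decide (pvDateOf a < pvDateOf b)) x (y :: ys)
          = x :: y :: ys := by
        simp [PySem.List.insertBy, hlt]
      rw [hxy]
      by_cases hxd : pvDateOf x == d
      · have hd : pvDateOf x = d := by simpa using hxd
        have hnone : ∀ z ∈ y :: ys, ¬ (pvDateOf z == d) = true := by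
          intro z hz
          have : pvDateOf y ≤ pvDateOf z := by
            rcases hz with _ | hz
            · exact le_refl _
            · exact hy _ (by assumption)
          have : d < pvDateOf z := lt_of_lt_of_le (hd ▸ hlt) this
          simp only [beq_iff_eq]
          exact fun he => absurd he.symm (ne_of_gt this).symm
        have hfil : (y :: ys).filter (fun y => pvDateOf y == d) = [] :=
          List.filter_eq_nil_iff.mpr hnone
        simp [hxd, hfil]
      · simp [List.filter_cons, hxd]
    · have hxy : PySem.List.insertBy (fun a b => decide (pvDateOf a < pvDateOf b)) x (y :: ys)
          = y :: PySem.List.insertBy (fun a b => decide (pvDateOf a < pvDateOf b)) x ys := by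
        simp [PySem.List.insertBy, hlt]
      rw [hxy]
      rw [List.filter_cons, List.filter_cons, ih hys]
      split_ifs <;> simp_all

theorem pv_filter_sorted (results : List (List (String × String))) (d : String) :
    (PySem.List.sorted results pvDateOf).filter (fun y => pvDateOf y == d) =
      results.filter (fun y => pvDateOf y == d) := by
  induction results using List.reverseRecOn with
  | nil => simp [PySem.List.sorted]
  | append_singleton xs x ih =>
    have hsnoc : PySem.List.sorted (xs ++ [x]) pvDateOf =
        PySem.List.insertBy (fun a b => decide (pvDateOf a < pvDateOf b)) x
          (PySem.List.sorted xs pvDateOf) := by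
      rw [PySem.List.sorted_eq_foldl_insertBy, List.foldl_append,
        ← PySem.List.sorted_eq_foldl_insertBy]
      rfl
    rw [hsnoc, pv_filter_insertBy d x _ (PySem.List.sorted_pairwise xs pvDateOf),
      List.filter_append]
    split_ifs with h <;> simp [ih, h]

theorem pv_runs_spec (s : List (List (String × String)))
    (h : s.Pairwise (fun a b => pvDateOf a ≤ pvDateOf b)) :
    ((pvRuns s).map Prod.fst).Pairwise (· < ·) ∧
    (∀ e, e ∈ (pvRuns s).map Prod.fst ↔ e ∈ s.map pvDateOf) ∧
    pvRuns s = ((pvRuns s).map Prod.fst).map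
      (fun e => (e, s.filter (fun r => pvDateOf r == e))) := by
  induction s using pvRuns.induct with
  | case1 => simp [pvRuns]
  | case2 r rest ih =>
    rcases List.pairwise_cons.mp h with ⟨hrd, hrest⟩
    have hut : rest.takeWhile (fun x => pvDateOf x == pvDateOf r) ++
        rest.dropWhile (fun x => pvDateOf x == pvDateOf r) = rest :=
      List.takeWhile_append_dropWhile
    have ht : ∀ x ∈ rest.takeWhile (fun x => pvDateOf x == pvDateOf r),
        pvDateOf x = pvDateOf r := by
      intro x hx
      simpa using List.mem_takeWhile_imp hx
    have hu_pw : (rest.dropWhile (fun x => pvDateOf x == pvDateOf r)).Pairwise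
        (fun a b => pvDateOf a ≤ pvDateOf b) :=
      hrest.sublist (List.dropWhile_sublist _)
    have hu_mem : ∀ x ∈ rest.dropWhile (fun x => pvDateOf x == pvDateOf r), x ∈ rest :=
      fun x hx => (List.dropWhile_sublist _).mem hx
    have hu_gt : ∀ x ∈ rest.dropWhile (fun x => pvDateOf x == pvDateOf r),
        pvDateOf r < pvDateOf x := by
      rcases hu' : rest.dropWhile (fun x => pvDateOf x == pvDateOf r) with _ | ⟨y, v⟩
      · intro x hx; simp at hx
      · have hyf : ((fun x => pvDateOf x == pvDateOf r) y) = false := by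
          have hh := List.head_dropWhile_not (fun x => pvDateOf x == pvDateOf r)
            (l := rest) (by simp [hu'])
          simp only [hu', List.head_cons] at hh
          exact hh
        have hylt : pvDateOf r < pvDateOf y := by
          have hle : pvDateOf r ≤ pvDateOf y := hrd y (hu_mem y (by simp [hu']))
          refine lt_of_le_of_ne hle fun he => ?_
          simp [← he] at hyf
        intro x hx
        rw [hu'] at hu_pw
        rcases List.mem_cons.mp hx with rfl | hx'
        · exact hylt
        · exact lt_of_lt_of_le hylt ((List.pairwise_cons.mp hu_pw).1 x hx')
    obtain ⟨ih1, ih2, ih3⟩ := ih hu_pw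
    have hKgt : ∀ e ∈ (pvRuns (rest.dropWhile (fun x => pvDateOf x == pvDateOf r))).map
        Prod.fst, pvDateOf r < e := by
      intro e he
      rcases List.mem_map.mp ((ih2 e).mp he) with ⟨x, hx, rfl⟩
      exact hu_gt x hx
    have hstep : pvRuns (r :: rest) =
        (pvDateOf r, r :: rest.takeWhile (fun x => pvDateOf x == pvDateOf r)) ::
          pvRuns (rest.dropWhile (fun x => pvDateOf x == pvDateOf r)) := by
      rw [pvRuns]
    refine ⟨?_, ?_, ?_⟩
    · rw [hstep]
      simp only [List.map_cons, List.pairwise_cons]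
      exact ⟨hKgt, ih1⟩
    · intro e
      rw [hstep]
      simp only [List.map_cons, List.mem_cons]
      rw [ih2 e]
      constructor
      · rintro (rfl | he)
        · exact Or.inl rfl
        · right
          rw [← hut, List.map_append]
          exact List.mem_append_right _ he
      · intro he
        rcases he with rfl | he'
        · exact Or.inl rfl
        · rw [← hut, List.map_append] at he'
          rcases List.mem_append.mp he' with hT | hU
          · rcases List.mem_map.mp hT with ⟨x, hx, rfl⟩
            exact Or.inl (ht x hx)
          · exact Or.inr hU
    · have hf1 : (r :: rest).filter (fun x => pvDateOf x == pvDateOf r) =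
          r :: rest.takeWhile (fun x => pvDateOf x == pvDateOf r) := by
        rw [List.filter_cons_of_pos (by simp)]
        congr 1
        conv_lhs => rw [← hut]
        rw [List.filter_append,
          List.filter_eq_self.mpr (fun x hx => by simp [ht x hx]),
          List.filter_eq_nil_iff.mpr
            (fun x hx => by simp [(hu_gt x hx).ne']), List.append_nil]
      have hf2 : ∀ e ∈ (pvRuns (rest.dropWhile (fun x => pvDateOf x == pvDateOf r))).map
          Prod.fst,
          (r :: rest).filter (fun x => pvDateOf x == e) =
            (rest.dropWhile (fun x => pvDateOf x == pvDateOf r)).filter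
              (fun x => pvDateOf x == e) := by
        intro e he
        have hde : pvDateOf r < e := hKgt e he
        rw [List.filter_cons_of_neg (by simp only [beq_iff_eq]; simp [hde.ne])]
        conv_lhs => rw [← hut]
        rw [List.filter_append,
          List.filter_eq_nil_iff.mpr
            (fun x hx => by simp only [beq_iff_eq]; rw [ht x hx]; simp [hde.ne]),
          List.nil_append]
      rw [hstep, List.map_cons, List.map_cons]
      congr 1
      · rw [hf1]
      · refine ih3.trans (List.map_congr_left fun e he => ?_)
        rw [hf2 e he]

theorem pv_A_eq (results : List (List (String × String))) :
    group_results_by_date results =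
      (PySem.List.sorted (PySem.Set.ofList (results.map pvDateOf)) (fun k => k)).map
        (fun d => (d, results.filter (fun r => pvDateOf r == d))) := by
  unfold group_results_by_date
  have hkeys : (results.foldl
      (fun d r => d.modify (pvDateOf r) [] (fun g => g ++ [r]))
      (PySem.Dict.empty : PySem.Dict String (List (List (String × String))))).keys =
      PySem.Set.ofList (results.map pvDateOf) := by
    rw [PySem.Dict.keys_foldl_modify_key results pvDateOf [] (fun _ r g => g ++ [r])]
    rw [PySem.Dict.keys_empty, PySem.Set.update_nil_left]
  have hgetD : ∀ c, (results.foldl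
      (fun d r => d.modify (pvDateOf r) [] (fun g => g ++ [r]))
      (PySem.Dict.empty : PySem.Dict String (List (List (String × String))))).getD c [] =
      results.filter (fun r => pvDateOf r == c) := by
    intro c
    have hm : results.foldl
        (fun d r => d.modify (pvDateOf r) [] (fun g => g ++ [r]))
        (PySem.Dict.empty : PySem.Dict String (List (List (String × String)))) =
        (results.map (fun r => (pvDateOf r, r))).foldl
          (fun d p => d.modify p.1 [] (fun g => g ++ [p.2])) PySem.Dict.empty := by
      rw [List.foldl_map]
    rw [hm, PySem.Dict.getD_foldl_modify_append, PySem.Dict.getD_empty, List.nil_append,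
      List.filter_map]
    simp [Function.comp_def]
  rw [pv_foldl_append_singleton, hkeys]
  exact List.map_congr_left fun k _ => by rw [hgetD k]

theorem group_results_by_date_spec : Claim_equal_group_results_by_date := by
  intro results _ _
  unfold Spec_group_results_by_date group_results_by_date_alt
  obtain ⟨h1, h2, h3⟩ := pv_runs_spec (PySem.List.sorted results pvDateOf)
    (PySem.List.sorted_pairwise results pvDateOf)
  have hks : PySem.List.sorted (PySem.Set.ofList (results.map pvDateOf)) (fun k => k) =
      (pvRuns (PySem.List.sorted results pvDateOf)).map Prod.fst := by
    apply PySem.List.sorted_eq_of_perm_of_pairwise_lt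
    · refine (List.perm_ext_iff_of_nodup (h1.imp ne_of_lt) (PySem.Set.nodup_ofList _)).mpr ?_
      intro e
      rw [h2 e, PySem.Set.mem_ofList]
      exact ((PySem.List.sorted_perm results pvDateOf false).map pvDateOf).mem_iff
    · exact h1
  rw [pv_A_eq, h3, hks]
  exact List.map_congr_left fun e _ => by rw [pv_filter_sorted results e]
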